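-- pv_equiv track=rewrite | github.com/iberdiev/coding_for_fun | Rummy card game implementation/question4-final.py | plays_made_so_far
-- ===== SOURCE A (Python) =====
-- def plays_made_so_far(active_player, play_history):
--     if play_history:
--         moves_made = 0
--         for i in range(len(play_history) - 1, -1, -1):
--             if play_history[i][0] != active_player:
--                 break
--             moves_made += 1
--         return moves_made
--     return 0
-- ===== SOURCE B (Python) =====
-- def plays_made_so_far(active_player, play_history):
--     # Single forward pass: run-length-encode consecutive runs of players,
--     # then inspect only the final run.
--     runs = []  # list of (player, run_length), oldest first
--     for player, _card in play_history:
--         if runs and runs[-1][0] == player: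
--             runs[-1] = (player, runs[-1][1] + 1)
--         else:
--             runs.append((player, 1))
--     if not runs:
--         return 0
--     last_player, n = runs[-1]
--     return n if last_player == active_player else 0
-- ===== Notes on version B (the rewrite author's own statement) =====
-- stated objective: alternative
-- what changed: Replaces the backward scan with early break by a forward run-length encoding of consecutive plays, then reads only the final run.
import Mathlib
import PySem

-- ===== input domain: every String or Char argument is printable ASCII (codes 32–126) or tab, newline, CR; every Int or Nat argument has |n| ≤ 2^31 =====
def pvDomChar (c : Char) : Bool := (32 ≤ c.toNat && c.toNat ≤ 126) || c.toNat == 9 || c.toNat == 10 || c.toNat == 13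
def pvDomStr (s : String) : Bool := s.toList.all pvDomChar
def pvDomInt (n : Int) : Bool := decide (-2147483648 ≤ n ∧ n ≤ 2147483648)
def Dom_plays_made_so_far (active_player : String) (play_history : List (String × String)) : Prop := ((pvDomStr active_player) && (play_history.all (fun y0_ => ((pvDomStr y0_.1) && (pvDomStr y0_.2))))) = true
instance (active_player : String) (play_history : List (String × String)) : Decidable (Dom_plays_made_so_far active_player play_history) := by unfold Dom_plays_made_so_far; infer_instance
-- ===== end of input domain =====

-- B replaces A's backward scan-with-break by a forward run-length encoding of
-- consecutive runs of players, reading only the final run (alternative decomposition).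

-- ===== PORT A =====
-- A iterates i = len-1 .. 0 over play_history with an early break; this indexed
-- backward walk is transliterated as a structural recursion over play_history.reverse.
def pvALoop (active_player : String) : List (String × String) → Int → Int
  | [], moves_made => moves_made
  | e :: rest, moves_made =>
      if e.1 ≠ active_player then moves_made
      else pvALoop active_player rest (moves_made + 1)

def plays_made_so_far (active_player : String) (play_history : List (String × String)) : Int :=
  if play_history ≠ [] then pvALoop active_player play_history.reverse 0 else 0

-- ===== PORT B =====
-- one loop step of Source B: extend the last run or start a new one
def pvStep (runs : List (String × Int)) (e : String × String) : List (String × Int) :=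
  match runs.getLast? with
  | some (q, n) => if q = e.1 then runs.dropLast ++ [(q, n + 1)] else runs ++ [(e.1, 1)]
  | none => runs ++ [(e.1, 1)]

def plays_made_so_far_alt (active_player : String) (play_history : List (String × String)) : Int :=
  match (play_history.foldl pvStep []).getLast? with
  | none => 0
  | some (q, n) => if q = active_player then n else 0

-- ===== PRECONDITION & SPEC =====
def Spec_plays_made_so_far (active_player : String) (play_history : List (String × String)) (out : Int) : Prop := out = plays_made_so_far_alt active_player play_history
instance (active_player : String) (play_history : List (String × String)) (out : Int) : Decidable (Spec_plays_made_so_far active_player play_history out) := by unfold Spec_plays_made_so_far; infer_instance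

-- ===== CLAIM (what is proved, stated in full; the proofs are below) =====
def Claim_equal_plays_made_so_far : Prop := ∀ (active_player : String) (play_history : List (String × String)), Dom_plays_made_so_far active_player play_history → Spec_plays_made_so_far active_player play_history (plays_made_so_far active_player play_history)

-- ===== LEMMAS AND PROOFS =====

lemma pvALoop_shift (ap : String) (r : List (String × String)) (m : Int) :
    pvALoop ap r m = m + pvALoop ap r 0 := by
  induction r generalizing m with
  | nil => simp [pvALoop]
  | cons e rest ih =>
      simp only [pvALoop]
      by_cases h : e.1 = ap
      · simp [h, ih (m + 1), ih 1]; ring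
      · simp [h]

lemma pvA_reverse (ap : String) (l : List (String × String)) :
    plays_made_so_far ap l = pvALoop ap l.reverse 0 := by
  cases l with
  | nil => simp [plays_made_so_far, pvALoop]
  | cons e rest => simp [plays_made_so_far]

lemma pvStep_last_none (runs : List (String × Int)) (e : String × String)
    (h : runs.getLast? = none) : (pvStep runs e).getLast? = some (e.1, 1) := by
  unfold pvStep; rw [h]; simp

lemma pvStep_last_some (runs : List (String × Int)) (e : String × String) (q : String) (n : Int)
    (h : runs.getLast? = some (q, n)) :
    (pvStep runs e).getLast? = some (if q = e.1 then (q, n + 1) else (e.1, 1)) := by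
  unfold pvStep; rw [h]
  by_cases hq : q = e.1 <;> simp [hq]

lemma pv_main (ap : String) (l : List (String × String)) :
    plays_made_so_far ap l = plays_made_so_far_alt ap l := by
  induction l using List.reverseRecOn with
  | nil => simp [plays_made_so_far, plays_made_so_far_alt]
  | append_singleton init x ih =>
      rw [pvA_reverse] at ih ⊢
      rw [List.reverse_append]
      simp only [List.reverse_cons, List.reverse_nil, List.nil_append, List.cons_append, pvALoop]
      unfold plays_made_so_far_alt
      rw [List.foldl_append]
      simp only [List.foldl_cons, List.foldl_nil]
      unfold plays_made_so_far_alt at ih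
      cases hlast : (init.foldl pvStep []).getLast? with
      | none =>
          have ih' : pvALoop ap init.reverse 0 = 0 := by
            rw [hlast] at ih; simpa using ih
          rw [pvStep_last_none _ _ hlast]
          by_cases h : x.1 = ap
          · rw [pvALoop_shift]
            simp [h, ih']
          · simp [h]
      | some qn =>
          obtain ⟨q, n⟩ := qn
          have ih' : pvALoop ap init.reverse 0 = if q = ap then n else 0 := by
            rw [hlast] at ih; simpa using ih
          rw [pvStep_last_some _ _ _ _ hlast]
          by_cases hq : q = x.1
          · by_cases h : x.1 = ap
            · rw [pvALoop_shift, ih']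
              simp [hq, h]
              omega
            · simp [h, hq]
          · by_cases h : x.1 = ap
            · have hqap : q ≠ ap := fun e => hq (e.trans h.symm)
              rw [pvALoop_shift, ih']
              simp [h, hqap]
            · simp [h, hq]

-- ===== VERDICT (by name: the statement is the Claim_ definition above) =====
theorem plays_made_so_far_spec : Claim_equal_plays_made_so_far := by
  intro ap ph _
  unfold Spec_plays_made_so_far
  exact pv_main ap ph
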